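-- pv_equiv track=rewrite | github.com/procopio420/vibeclouding-ingestion-service | app/serializers/markdown_serializer.py | render_stack
-- ===== SOURCE A (Python) =====
-- from typing import Dict, Any
--
-- def render_stack(context: Dict) -> str:
--     """Generate 02-stack.md from context."""
--     stack = context.get("stack", {})
--
--     lines = [
--         "# Technology Stack",
--         "",
--     ]
--
--     languages = stack.get("languages", [])
--     if languages:
--         lines.append("## Languages")
--         lines.append("")
--         for lang in languages:
--             lines.append(f"- {lang}")
--         lines.append("")
--
--     frameworks = stack.get("frameworks", [])
--     if frameworks:
--         lines.append("## Frameworks")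
--         lines.append("")
--         for fw in frameworks:
--             lines.append(f"- {fw}")
--         lines.append("")
--
--     databases = stack.get("databases", [])
--     if databases:
--         lines.append("## Databases & Storage")
--         lines.append("")
--         for db in databases:
--             lines.append(f"- {db}")
--         lines.append("")
--
--     infrastructure = stack.get("infrastructure", [])
--     if infrastructure:
--         lines.append("## Infrastructure")
--         lines.append("")
--         for infra in infrastructure:
--             lines.append(f"- {infra}")
--         lines.append("")
--
--     external_services = stack.get("external_services", [])
--     if external_services:
--         lines.append("## External Services")
--         lines.append("")
--         for svc in external_services:
--             lines.append(f"- {svc}")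
--         lines.append("")
--
--     if not any([languages, frameworks, databases, infrastructure, external_services]):
--         lines.append("*No stack information detected.*")
--
--     return "\n".join(lines)
-- ===== SOURCE B (Python) =====
-- SECTIONS = (
--     ("languages", "Languages"),
--     ("frameworks", "Frameworks"),
--     ("databases", "Databases & Storage"),
--     ("infrastructure", "Infrastructure"),
--     ("external_services", "External Services"),
-- )
--
--
-- def render_stack(context):
--     """Generate 02-stack.md from context, emitting the document as one string:
--     recursion over the sections, every line after the title carries its own
--     leading newline, so no intermediate list of lines and no join at the end."""
--     stack = context.get("stack", {})
--
--     def emit(sections):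
--         if not sections:
--             return ""
--         (key, heading), rest = sections[0], sections[1:]
--         tail = emit(rest)
--         items = stack.get(key, [])
--         if not items:
--             return tail
--         bullets = "".join("\n- " + str(item) for item in items)
--         return "\n## " + heading + "\n" + bullets + "\n" + tail
--
--     body = emit(SECTIONS)
--     return "# Technology Stack\n" + (body if body else "\n*No stack information detected.*")
-- ===== Notes on version B (the rewrite author's own statement) =====
-- stated objective: alternative
-- what changed: Instead of appending lines to a list and '\n'.join-ing at the end, B recurses over the section list and builds the result as one string directly, each line after the title carrying its own leading newline; the empty-stack sentinel is decided by the emitted body being the empty string instead of any([...]).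
import Mathlib
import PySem

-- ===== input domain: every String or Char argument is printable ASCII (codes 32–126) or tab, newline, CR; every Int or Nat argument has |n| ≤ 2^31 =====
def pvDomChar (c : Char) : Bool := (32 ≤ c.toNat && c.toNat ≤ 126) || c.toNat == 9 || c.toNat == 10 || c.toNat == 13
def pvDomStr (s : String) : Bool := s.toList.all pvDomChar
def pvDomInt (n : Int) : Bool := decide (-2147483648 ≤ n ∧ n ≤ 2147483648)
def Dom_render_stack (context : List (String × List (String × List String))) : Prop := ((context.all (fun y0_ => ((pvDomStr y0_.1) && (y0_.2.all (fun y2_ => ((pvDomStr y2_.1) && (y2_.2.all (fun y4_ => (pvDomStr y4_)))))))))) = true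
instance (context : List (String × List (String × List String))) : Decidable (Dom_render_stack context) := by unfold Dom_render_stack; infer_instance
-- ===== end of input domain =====

-- B builds the document recursively as ONE string (each line after the title carries its
-- own leading newline) instead of A's append-to-a-list-of-lines plus a final "\n".join.

-- ===== PORT A =====
def render_stack (context : List (String × List (String × List String))) : String :=
  let stack := (PySem.Dict.mk context).getD "stack" []
  let lines := ["# Technology Stack", ""]
  let languages := (PySem.Dict.mk stack).getD "languages" []
  let lines := if languages ≠ [] then
      ((lines ++ ["## Languages", ""]) ++ languages.map (fun lang => "- " ++ lang)) ++ [""]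
    else lines
  let frameworks := (PySem.Dict.mk stack).getD "frameworks" []
  let lines := if frameworks ≠ [] then
      ((lines ++ ["## Frameworks", ""]) ++ frameworks.map (fun fw => "- " ++ fw)) ++ [""]
    else lines
  let databases := (PySem.Dict.mk stack).getD "databases" []
  let lines := if databases ≠ [] then
      ((lines ++ ["## Databases & Storage", ""]) ++ databases.map (fun db => "- " ++ db)) ++ [""]
    else lines
  let infrastructure := (PySem.Dict.mk stack).getD "infrastructure" []
  let lines := if infrastructure ≠ [] then
      ((lines ++ ["## Infrastructure", ""]) ++ infrastructure.map (fun infra => "- " ++ infra)) ++ [""]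
    else lines
  let external_services := (PySem.Dict.mk stack).getD "external_services" []
  let lines := if external_services ≠ [] then
      ((lines ++ ["## External Services", ""]) ++ external_services.map (fun svc => "- " ++ svc)) ++ [""]
    else lines
  let lines := if ¬(languages ≠ [] ∨ frameworks ≠ [] ∨ databases ≠ [] ∨ infrastructure ≠ [] ∨ external_services ≠ []) then
      lines ++ ["*No stack information detected.*"]
    else lines
  PySem.Str.join "\n" lines

-- ===== PORT B =====
def sectionsTable : List (String × String) :=
  [("languages", "Languages"), ("frameworks", "Frameworks"),
   ("databases", "Databases & Storage"), ("infrastructure", "Infrastructure"),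
   ("external_services", "External Services")]

-- Source B's inner recursive 'emit' over the remaining sections
def emit (stack : List (String × List String)) : List (String × String) → String
  | [] => ""
  | (key, heading) :: rest =>
      let tail := emit stack rest
      let items := (PySem.Dict.mk stack).getD key []
      if items = [] then tail
      else
        let bullets := PySem.Str.join "" (items.map (fun item => "\n- " ++ item))
        "\n## " ++ heading ++ "\n" ++ bullets ++ "\n" ++ tail

def render_stack_alt (context : List (String × List (String × List String))) : String :=
  let stack := (PySem.Dict.mk context).getD "stack" []
  let body := emit stack sectionsTable
  "# Technology Stack\n" ++ (if body ≠ "" then body else "\n*No stack information detected.*")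

-- ===== PRECONDITION & SPEC =====
def Spec_render_stack (context : List (String × List (String × List String))) (out : String) : Prop := out = render_stack_alt context
instance (context : List (String × List (String × List String))) (out : String) : Decidable (Spec_render_stack context out) := by unfold Spec_render_stack; infer_instance

-- ===== CLAIM (what is proved, stated in full; the proofs are below) =====
def Claim_equal_render_stack : Prop := ∀ (context : List (String × List (String × List String))), Dom_render_stack context → Spec_render_stack context (render_stack context)

-- ===== LEMMAS AND PROOFS =====

-- "\n".join written as: first line, then every further line with a leading '\n'
theorem join_nl_eq (x : List Char) (ls : List (List Char)) :
    PySem.Chars.join ['\n'] (x :: ls) = x ++ ls.flatMap (fun l => '\n' :: l) := by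
  induction ls generalizing x with
  | nil => simp [PySem.Chars.join_singleton]
  | cons y ys ih => simp [PySem.Chars.join_cons_cons, ih]

-- "".join is concatenation
theorem join_empty_sep (ps : List (List Char)) : PySem.Chars.join [] ps = ps.flatten := by
  induction ps with
  | nil => simp [PySem.Chars.join_nil]
  | cons p ps ih =>
      cases ps with
      | nil => simp [PySem.Chars.join_singleton]
      | cons q qs => simpa [PySem.Chars.join_cons_cons] using ih

-- the bullet block: A's per-line form (each line with its joining newline) equals B's "".join form
theorem bullets_ab (items : List String) :
    List.flatMap (fun l => '\n' :: l) (List.map (String.toList ∘ fun i => "- " ++ i) items)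
      = PySem.Chars.join [] (List.map (String.toList ∘ fun item => "\n- " ++ item) items) := by
  rw [join_empty_sep]
  induction items with
  | nil => simp
  | cons i is ih => simpa [Function.comp] using ih

-- ===== VERDICT (by name: the statement is the Claim_ definition above) =====
theorem render_stack_spec : Claim_equal_render_stack := by
  intro context _
  unfold Spec_render_stack render_stack render_stack_alt
  simp only [sectionsTable, emit]
  generalize (PySem.Dict.mk context).getD "stack" ([] : List (String × List String)) = stack
  generalize hL' : (PySem.Dict.mk stack).getD "languages" ([] : List String) = L
  generalize hF' : (PySem.Dict.mk stack).getD "frameworks" ([] : List String) = F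
  generalize hD' : (PySem.Dict.mk stack).getD "databases" ([] : List String) = D
  generalize hI' : (PySem.Dict.mk stack).getD "infrastructure" ([] : List String) = I
  generalize hE' : (PySem.Dict.mk stack).getD "external_services" ([] : List String) = E
  apply String.toList_inj.mp
  by_cases hL : L = [] <;> by_cases hF : F = [] <;> by_cases hD : D = [] <;>
    by_cases hI : I = [] <;> by_cases hE : E = [] <;>
    simp [hL, hF, hD, hI, hE, PySem.Str.toList_join, join_nl_eq, bullets_ab]
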